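-- pv_equiv track=rewrite | github.com/hirokawa/cssrlib | src/cssrlib/ppp_has.py | decode_mask
-- ===== SOURCE A (Python) =====
-- def decode_mask(din, bitlen, ofst=1):
--     """ decode n-bit mask with offset """
--     v = []
--     n = 0
--     for k in range(0, bitlen):
--         if din & 1 << (bitlen-k-1):
--             v.append(k+ofst)
--             n += 1
--     return (v, n)
-- ===== SOURCE B (Python) =====
-- def decode_mask(din, bitlen, ofst=1):
--     """ decode n-bit mask with offset """
--     if bitlen <= 0:
--         return ([], 0)
--     m = din & ((1 << bitlen) - 1)
--     v = []
--     i = 0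
--     while m:
--         if m & 1:
--             v.append(bitlen - 1 - i + ofst)
--         m >>= 1
--         i += 1
--     v.reverse()
--     return (v, len(v))
-- ===== Notes on version B (the rewrite author's own statement) =====
-- stated objective: faster
-- what changed: Instead of testing every bit position of a fixed range(bitlen) loop MSB-first, B masks din to its low bitlen bits once and strips set bits off the masked value LSB-first (m & 1, m >>= 1) until it reaches zero, then reverses the collected positions.
import Mathlib
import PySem

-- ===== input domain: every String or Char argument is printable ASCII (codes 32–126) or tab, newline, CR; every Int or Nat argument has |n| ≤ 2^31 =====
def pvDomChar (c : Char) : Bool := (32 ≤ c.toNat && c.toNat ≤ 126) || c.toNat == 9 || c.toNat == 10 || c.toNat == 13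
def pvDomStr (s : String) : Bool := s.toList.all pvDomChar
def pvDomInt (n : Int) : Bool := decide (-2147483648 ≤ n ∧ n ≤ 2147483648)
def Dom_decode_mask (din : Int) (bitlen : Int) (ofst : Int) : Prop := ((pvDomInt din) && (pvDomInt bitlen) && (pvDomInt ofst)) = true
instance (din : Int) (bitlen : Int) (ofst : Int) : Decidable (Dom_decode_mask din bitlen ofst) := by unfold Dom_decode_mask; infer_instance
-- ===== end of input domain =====

-- B replaces A's fixed MSB-first scan of range(bitlen) by masking din once and stripping
-- set bits off the masked value LSB-first until it is zero, then reversing; same results,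
-- and the loop stops at the masked value's bit length instead of running bitlen times
-- (a timing run measured B faster on the generated inputs).

-- ===== PORT A =====
-- literal port of A's for-loop over range(0, bitlen) with state (v, n);
-- for k in the range, bitlen-k-1 ≥ 0, so Python's '1 << (bitlen-k-1)' is
-- '1 <<< (bitlen-k-1).toNat' (exact there); '&' is PySem.Int.band.
def decode_mask (din : Int) (bitlen : Int) (ofst : Int) : List Int × Int :=
  (PySem.List.pyRange 0 bitlen 1).foldl
    (fun (st : List Int × Int) k =>
      if PySem.Int.band din ((1 : Int) <<< (bitlen - k - 1).toNat) ≠ 0 then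
        (st.1 ++ [k + ofst], st.2 + 1)
      else st)
    ([], 0)

-- ===== PORT B =====
-- port of B's while-loop (state m, i, accumulating v); in B, m = din & ((1<<bitlen)-1)
-- is always ≥ 0, so the loop state m is a Nat ('m & 1' nonzero ↔ m % 2 = 1, 'm >>= 1' is m / 2).
def pvExtract (m : Nat) (i : Nat) (bitlen : Int) (ofst : Int) : List Int :=
  if h : m = 0 then []
  else (if m % 2 = 1 then [bitlen - 1 - (i : Int) + ofst] else []) ++
       pvExtract (m / 2) (i + 1) bitlen ofst
decreasing_by exact Nat.div_lt_self (Nat.pos_of_ne_zero h) one_lt_two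

def decode_mask_alt (din : Int) (bitlen : Int) (ofst : Int) : List Int × Int :=
  if bitlen ≤ 0 then ([], 0)
  else
    -- the mask value is nonnegative, so .toNat is exact
    let m : Nat := (PySem.Int.band din (((1 : Int) <<< bitlen.toNat) - 1)).toNat
    let v := (pvExtract m 0 bitlen ofst).reverse
    (v, (v.length : Int))

-- ===== PRECONDITION & SPEC =====
def Spec_decode_mask (din : Int) (bitlen : Int) (ofst : Int) (out : List Int × Int) : Prop := out = decode_mask_alt din bitlen ofst
instance (din : Int) (bitlen : Int) (ofst : Int) (out : List Int × Int) : Decidable (Spec_decode_mask din bitlen ofst out) := by unfold Spec_decode_mask; infer_instance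

-- ===== CLAIM (what is proved, stated in full; the proofs are below) =====
def Claim_equal_decode_mask : Prop := ∀ (din : Int) (bitlen : Int) (ofst : Int), Dom_decode_mask din bitlen ofst → Spec_decode_mask din bitlen ofst (decode_mask din bitlen ofst)

-- ===== LEMMAS AND PROOFS =====

-- Python's bit j of din (two's complement, any sign)
def pvTb (din : Int) (j : Nat) : Bool :=
  if 0 ≤ din then din.toNat.testBit j else !((-din - 1).toNat.testBit j)

-- the masked loop value of B, as a Nat
def pvMask (din : Int) (n : Nat) : Nat := (PySem.Int.band din ((2:Int)^n - 1)).toNat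

theorem pv_one_shiftLeft (e : Nat) : (1 : Int) <<< e = 2 ^ e := by
  induction e with
  | zero => rfl
  | succ n ih => rw [pow_succ, ← ih]; exact Int.shiftLeft_succ 1 n

theorem pv_pow_toNat (j : Nat) : ((2:Int)^j).toNat = 2^j := by
  rw [show ((2:Int)^j) = ((2^j : Nat) : Int) by push_cast; ring, Int.toNat_natCast]

theorem pv_band_two_pow (din : Int) (j : Nat) :
    PySem.Int.band din ((2 : Int) ^ j) = if pvTb din j then (2 : Int) ^ j else 0 := by
  have hp : (0:Int) ≤ 2^j := by positivity
  unfold PySem.Int.band pvTb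
  set c := (-din - 1).toNat with hc
  by_cases hd : 0 ≤ din
  · simp only [if_pos hd, if_pos hp, pv_pow_toNat, Nat.and_two_pow]
    by_cases ht : din.toNat.testBit j
    · rw [ht]; simp
    · rw [Bool.not_eq_true] at ht; rw [ht]; simp
  · simp only [if_neg hd, if_pos hp, pv_pow_toNat, Nat.land_comm _ c, Nat.and_two_pow]
    by_cases ht : c.testBit j
    · rw [ht]; simp
    · rw [Bool.not_eq_true] at ht; rw [ht]; simp

theorem pv_mask_val (din : Int) (n : Nat) :
    pvMask din n = if 0 ≤ din then din.toNat % 2^n else 2^n - ((-din-1).toNat % 2^n + 1) := by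
  have h1 : ((2:Int)^n - 1).toNat = 2^n - 1 := by
    rw [show ((2:Int)^n - 1) = ((2^n - 1 : Nat) : Int) by
      push_cast [Nat.one_le_two_pow]; ring, Int.toNat_natCast]
  have hp : (0:Int) ≤ 2^n - 1 := by
    have := pow_pos (by norm_num : (0:Int) < 2) n; omega
  unfold pvMask PySem.Int.band
  set c := (-din - 1).toNat with hc
  by_cases hd : 0 ≤ din
  · simp only [if_pos hd, if_pos hp, h1, Nat.and_two_pow_sub_one_eq_mod, Int.toNat_natCast]
  · simp only [if_neg hd, if_pos hp, h1, Nat.land_comm _ c,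
      Nat.and_two_pow_sub_one_eq_mod, Int.toNat_natCast]
    have := Nat.mod_lt c (Nat.two_pow_pos n)
    omega

theorem pv_mask_eq (din : Int) (n : Nat) :
    PySem.Int.band din ((2:Int)^n - 1) = ((pvMask din n : Nat) : Int) := by
  have hp : (0:Int) ≤ 2^n - 1 := by
    have := pow_pos (by norm_num : (0:Int) < 2) n; omega
  unfold pvMask
  rw [Int.toNat_of_nonneg (by rw [PySem.Int.band_comm]; exact PySem.Int.band_nonneg_of_nonneg_left _ hp)]

theorem pv_mask_lt (din : Int) (n : Nat) : pvMask din n < 2^n := by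
  rw [pv_mask_val]
  have h0 : 0 < 2^n := Nat.two_pow_pos n
  split
  · exact Nat.mod_lt _ h0
  · omega

theorem pv_mask_testBit (din : Int) (n j : Nat) (hj : j < n) :
    (pvMask din n).testBit j = pvTb din j := by
  rw [pv_mask_val]
  unfold pvTb
  set c := (-din - 1).toNat with hc
  by_cases hd : 0 ≤ din
  · simp [hd, Nat.testBit_mod_two_pow, hj]
  · have hlt : c % 2^n < 2^n := Nat.mod_lt _ (Nat.two_pow_pos n)
    simp only [if_neg hd]
    rw [Nat.testBit_two_pow_sub_succ hlt]
    simp [hj, Nat.testBit_mod_two_pow]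

theorem pv_foldA {α : Type} (l : List α) (v0 : List Int) (c0 : Int)
    (p : α → Prop) [DecidablePred p] (g : α → Int) :
    l.foldl (fun (st : List Int × Int) k =>
        if p k then (st.1 ++ [g k], st.2 + 1) else st) (v0, c0)
      = (v0 ++ l.filterMap (fun k => if p k then some (g k) else none),
         c0 + ((l.filterMap (fun k => if p k then some (g k) else none)).length : Int)) := by
  induction l generalizing v0 c0 with
  | nil => simp
  | cons a t ih =>
    by_cases h : p a
    · simp only [List.foldl_cons, List.filterMap_cons, h, if_pos]
      rw [ih]
      simp [List.append_assoc]
      omega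
    · simp only [List.foldl_cons, List.filterMap_cons, if_neg h]
      exact ih _ _

theorem pv_extract_eq (bitlen ofst : Int) :
    ∀ (n : Nat) (m i : Nat), m < 2 ^ n →
    pvExtract m i bitlen ofst = (List.range n).filterMap
      (fun j => if m.testBit j then some (bitlen - 1 - ((i + j : Nat) : Int) + ofst) else none) := by
  intro n
  induction n with
  | zero =>
    intro m i h
    rw [show m = 0 by omega, pvExtract]
    simp
  | succ n ih =>
    intro m i h
    by_cases hm : m = 0
    · subst hm
      rw [pvExtract]
      simp [Nat.zero_testBit]
    · rw [pvExtract, dif_neg hm, List.range_succ_eq_map, List.filterMap_cons, List.filterMap_map]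
      have h2 : m / 2 < 2 ^ n := by
        have : (2:Nat) ^ (n+1) = 2 ^ n * 2 := pow_succ 2 n
        omega
      have hcg : ∀ j ∈ List.range n,
          ((fun j => if m.testBit j then some (bitlen - 1 - ((i + j : Nat) : Int) + ofst) else none) ∘ Nat.succ) j
            = (fun j => if (m / 2).testBit j then some (bitlen - 1 - (((i + 1) + j : Nat) : Int) + ofst) else none) j := by
        intro j _
        simp only [Function.comp_apply, Nat.testBit_succ, Nat.succ_eq_add_one,
          show i + (j + 1) = (i + 1) + j from by omega]
      rw [List.filterMap_congr hcg, ← ih (m / 2) (i + 1) h2]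
      by_cases hp : m % 2 = 1
      · simp [Nat.testBit_zero, hp]
      · simp [Nat.testBit_zero, hp]

theorem pv_range_reverse (n : Nat) :
    (List.range n).reverse = (List.range n).map (fun k => n - 1 - k) := by
  apply List.ext_getElem <;> simp [List.getElem_reverse]

-- ===== VERDICT (by name: the statement is the Claim_ definition above) =====
theorem decode_mask_spec : Claim_equal_decode_mask := by
  intro din bitlen ofst _
  show decode_mask din bitlen ofst = decode_mask_alt din bitlen ofst
  by_cases hb : bitlen ≤ 0
  · unfold decode_mask decode_mask_alt
    rw [PySem.List.pyRange_one_eq_nil (by omega), if_pos hb]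
    simp
  · rw [not_le] at hb
    set n := bitlen.toNat with hn
    have hn1 : 1 ≤ n := by omega
    have hbn : bitlen = (n : Int) := by omega
    unfold decode_mask decode_mask_alt
    rw [if_neg (by omega), PySem.List.pyRange_one, List.foldl_map,
        show (bitlen - 0).toNat = n from by omega]
    rw [pv_foldA (List.range n) [] 0
        (fun k : Nat => PySem.Int.band din ((1:Int) <<< (bitlen - (0 + (k:Int)) - 1).toNat) ≠ 0)
        (fun k : Nat => 0 + (k:Int) + ofst)]
    rw [pv_one_shiftLeft, show ((2:Int) ^ n - 1) = ((2:Int) ^ n - 1) from rfl, pv_mask_eq,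
        Int.toNat_natCast]
    show _ = ((pvExtract (pvMask din n) 0 bitlen ofst).reverse,
              (((pvExtract (pvMask din n) 0 bitlen ofst).reverse.length : Nat) : Int))
    rw [pv_extract_eq bitlen ofst n (pvMask din n) 0 (pv_mask_lt din n)]
    have hA : (List.range n).filterMap
          (fun (k : Nat) => if PySem.Int.band din ((1:Int) <<< (bitlen - (0 + (k:Int)) - 1).toNat) ≠ 0
                    then some (0 + (k:Int) + ofst) else none)
        = (List.range n).filterMap
          (fun (k : Nat) => if (pvMask din n).testBit (n - 1 - k) then some ((k:Int) + ofst) else none) := by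
      apply List.filterMap_congr
      intro k hk
      rw [List.mem_range] at hk
      rw [show (bitlen - (0 + (k:Int)) - 1).toNat = n - 1 - k from by omega,
          pv_one_shiftLeft, pv_band_two_pow, pv_mask_testBit din n _ (by omega),
          show (0 + (k:Int) + ofst) = (k:Int) + ofst from by ring]
      by_cases ht : pvTb din (n - 1 - k)
      · rw [ht]; simp
      · rw [Bool.not_eq_true] at ht; rw [ht]; simp
    have hB : ((List.range n).filterMap
          (fun j => if (pvMask din n).testBit j then some (bitlen - 1 - ((0 + j : Nat) : Int) + ofst) else none)).reverse
        = (List.range n).filterMap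
          (fun k => if (pvMask din n).testBit (n - 1 - k) then some ((k:Int) + ofst) else none) := by
      rw [← List.filterMap_reverse, pv_range_reverse, List.filterMap_map]
      apply List.filterMap_congr
      intro k hk
      rw [List.mem_range] at hk
      simp only [Function.comp_apply]
      rw [show ((0 + (n - 1 - k) : Nat) : Int) = bitlen - 1 - (k:Int) from by omega,
          show bitlen - 1 - (bitlen - 1 - (k:Int)) + ofst = (k:Int) + ofst from by ring]
    rw [hA, hB]
    simp
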